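-- pv_equiv track=rewrite | github.com/mumuyolo19-ss/Mac_demo | tetris.py | build_rotations
-- ===== SOURCE A (Python) =====
-- from typing import Dict, List, Optional, Tuple
--
-- Coord = Tuple[int, int]
--
-- def rotate_coords_4x4(coords: List[Coord]) -> List[Coord]:
--     """
--     Rotate 4x4-grid coordinates clockwise.
--     Transform: (x, y) -> (y, 3 - x)
--     """
--     return [(y, 3 - x) for (x, y) in coords]
--
-- def build_rotations(base_coords: List[Coord]) -> List[List[Coord]]:
--     rots = [base_coords]
--     cur = base_coords
--     for _ in range(3):
--         cur = rotate_coords_4x4(cur)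
--         # Keep stable ordering for determinism.
--         rots.append(sorted(cur))
--     # Normalize initial ordering too.
--     rots[0] = sorted(rots[0])
--     return rots
-- ===== SOURCE B (Python) =====
-- def build_rotations(base_coords):
--     def tf(k, x, y):
--         if k == 0:
--             return (x, y)
--         if k == 1:
--             return (y, 3 - x)
--         if k == 2:
--             return (3 - x, 3 - y)
--         return (3 - y, x)
--     return [sorted(tf(k, x, y) for (x, y) in base_coords) for k in range(4)]
-- ===== Notes on version B (the rewrite author's own statement) =====
-- stated objective: simpler
-- what changed: Each of the four rotations is computed independently from base_coords via a closed-form k-fold transform and sorted, replacing the running accumulator cur = rotate(cur) and the post-hoc sort of rots[0].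
import Mathlib
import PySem

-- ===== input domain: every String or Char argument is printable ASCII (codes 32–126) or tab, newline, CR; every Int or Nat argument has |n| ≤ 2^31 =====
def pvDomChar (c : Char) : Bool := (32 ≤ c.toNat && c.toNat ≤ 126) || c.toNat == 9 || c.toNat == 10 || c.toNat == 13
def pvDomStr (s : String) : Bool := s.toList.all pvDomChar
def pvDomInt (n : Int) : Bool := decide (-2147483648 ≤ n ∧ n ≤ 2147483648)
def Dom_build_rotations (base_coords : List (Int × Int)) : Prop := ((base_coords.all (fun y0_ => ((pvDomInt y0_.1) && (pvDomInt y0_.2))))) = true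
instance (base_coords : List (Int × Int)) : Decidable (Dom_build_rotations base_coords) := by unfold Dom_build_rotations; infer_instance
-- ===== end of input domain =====

-- B computes each of the four rotations independently by a closed-form k-fold transform instead of iterating cur = rotate(cur): simpler decomposition, same cost.


-- ===== PORT A =====
def rotate_coords_4x4 (coords : List (Int × Int)) : List (Int × Int) :=
  coords.map (fun p => (p.2, 3 - p.1))

def build_rotations (base_coords : List (Int × Int)) : List (List (Int × Int)) :=
  let init : List (List (Int × Int)) × List (Int × Int) := ([base_coords], base_coords)
  let st := (PySem.List.pyRange 0 3 1).foldl (fun st _ =>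
    let cur := rotate_coords_4x4 st.2
    (st.1 ++ [PySem.List.sorted2 cur Prod.fst Prod.snd false], cur)) init
  match st.1 with
  | [] => []
  | r0 :: rest => PySem.List.sorted2 r0 Prod.fst Prod.snd false :: rest

-- ===== PORT B =====
def pvTf (k : Int) (x y : Int) : Int × Int :=
  if k = 0 then (x, y)
  else if k = 1 then (y, 3 - x)
  else if k = 2 then (3 - x, 3 - y)
  else (3 - y, x)

def build_rotations_alt (base_coords : List (Int × Int)) : List (List (Int × Int)) :=
  (PySem.List.pyRange 0 4 1).map (fun k =>
    PySem.List.sorted2 (base_coords.map (fun p => pvTf k p.1 p.2)) Prod.fst Prod.snd false)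

-- ===== PRECONDITION & SPEC =====
def Spec_build_rotations (base_coords : List (Int × Int)) (out : List (List (Int × Int))) : Prop := out = build_rotations_alt base_coords
instance (base_coords : List (Int × Int)) (out : List (List (Int × Int))) : Decidable (Spec_build_rotations base_coords out) := by unfold Spec_build_rotations; infer_instance

-- ===== CLAIM (what is proved, stated in full; the proofs are below) =====
def Claim_equal_build_rotations : Prop := ∀ (base_coords : List (Int × Int)), Dom_build_rotations base_coords → Spec_build_rotations base_coords (build_rotations base_coords)

-- ===== LEMMAS AND PROOFS =====

-- ===== VERDICT (by name: the statement is the Claim_ definition above) =====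
theorem build_rotations_spec : Claim_equal_build_rotations := by
  intro base_coords _
  unfold Spec_build_rotations build_rotations build_rotations_alt
  simp [PySem.List.pyRange, rotate_coords_4x4, pvTf, List.range_succ, List.map_map]
  refine ⟨?_, ?_⟩ <;> (congr 1; try (apply List.map_congr_left; intro p _; simp [Function.comp]))
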